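-- pv_equiv track=rewrite | github.com/SinhaSoumyadeep/InvertedIndex | corpus.py | findAdjecency
-- ===== SOURCE A (Python) =====
-- def findAdjecency(positionOfList1, positionOfList2, proximityWindow):
--
--     terms_are_in_proximity = False
--     for pos in positionOfList1:
--         for p in positionOfList2:
--             if abs(pos - p) <= proximityWindow:
--                 terms_are_in_proximity = True
--                 break
--
--     return terms_are_in_proximity
-- ===== SOURCE B (Python) =====
-- def findAdjecency(positionOfList1, positionOfList2, proximityWindow):
--     xs = sorted(positionOfList1)
--     ys = sorted(positionOfList2)
--     i = j = 0
--     while i < len(xs) and j < len(ys):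
--         d = xs[i] - ys[j]
--         if abs(d) <= proximityWindow:
--             return True
--         if d < 0:
--             i += 1
--         else:
--             j += 1
--     return False
-- ===== Notes on version B (the rewrite author's own statement) =====
-- stated objective: faster
-- what changed: Replaced the nested scan over all pairs by sorting both lists and a two-pointer sweep that advances the pointer with the smaller head.
import Mathlib
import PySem

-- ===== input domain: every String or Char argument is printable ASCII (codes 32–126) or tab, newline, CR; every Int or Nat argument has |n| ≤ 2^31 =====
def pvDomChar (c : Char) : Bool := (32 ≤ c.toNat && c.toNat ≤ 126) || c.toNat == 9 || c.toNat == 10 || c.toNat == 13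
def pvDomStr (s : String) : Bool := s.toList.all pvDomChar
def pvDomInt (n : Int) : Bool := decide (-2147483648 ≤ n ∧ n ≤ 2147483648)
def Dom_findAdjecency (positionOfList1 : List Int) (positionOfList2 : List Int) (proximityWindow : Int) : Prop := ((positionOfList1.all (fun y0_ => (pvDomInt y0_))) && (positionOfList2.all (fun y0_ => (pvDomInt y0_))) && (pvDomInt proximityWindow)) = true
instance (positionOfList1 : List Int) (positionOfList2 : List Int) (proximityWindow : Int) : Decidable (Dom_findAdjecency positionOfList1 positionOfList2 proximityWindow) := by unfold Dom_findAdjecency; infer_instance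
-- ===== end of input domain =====

-- B replaces A's nested scan over all pairs by sorting both lists and a two-pointer sweep (faster in a timing run).

-- ===== PORT A =====
-- inner 'for p in positionOfList2: if |pos-p| <= w: flag = True; break' loop, carrying the flag
def pvInnerA (pos : Int) (l2 : List Int) (w : Int) (flag : Bool) : Bool :=
  match l2 with
  | [] => flag
  | p :: ps => if |pos - p| ≤ w then true else pvInnerA pos ps w flag

def findAdjecency (positionOfList1 : List Int) (positionOfList2 : List Int) (proximityWindow : Int) : Bool :=
  positionOfList1.foldl (fun flag pos => pvInnerA pos positionOfList2 proximityWindow flag) false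

-- ===== PORT B =====
-- two-pointer sweep over the two sorted lists (pointer with the smaller head advances)
def pvSweep (w : Int) : List Int → List Int → Bool
  | [], _ => false
  | _ :: _, [] => false
  | a :: as_, b :: bs => if |a - b| ≤ w then true
      else if a < b then pvSweep w as_ (b :: bs) else pvSweep w (a :: as_) bs
termination_by xs ys => xs.length + ys.length

def findAdjecency_alt (positionOfList1 : List Int) (positionOfList2 : List Int) (proximityWindow : Int) : Bool :=
  pvSweep proximityWindow (PySem.List.sorted positionOfList1 (fun x => x) false)
                          (PySem.List.sorted positionOfList2 (fun x => x) false)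

-- ===== PRECONDITION & SPEC =====
def Spec_findAdjecency (positionOfList1 : List Int) (positionOfList2 : List Int) (proximityWindow : Int) (out : Bool) : Prop := out = findAdjecency_alt positionOfList1 positionOfList2 proximityWindow
instance (positionOfList1 : List Int) (positionOfList2 : List Int) (proximityWindow : Int) (out : Bool) : Decidable (Spec_findAdjecency positionOfList1 positionOfList2 proximityWindow out) := by unfold Spec_findAdjecency; infer_instance

-- ===== CLAIM (what is proved, stated in full; the proofs are below) =====
def Claim_equal_findAdjecency : Prop := ∀ (positionOfList1 : List Int) (positionOfList2 : List Int) (proximityWindow : Int), Dom_findAdjecency positionOfList1 positionOfList2 proximityWindow → Spec_findAdjecency positionOfList1 positionOfList2 proximityWindow (findAdjecency positionOfList1 positionOfList2 proximityWindow)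

-- ===== LEMMAS AND PROOFS =====

-- the common yardstick: "some cross pair is within the window", as a Bool
def pvPair (l1 l2 : List Int) (w : Int) : Bool :=
  l1.any fun a => l2.any fun b => |a - b| ≤ w

theorem pvInnerA_eq (pos : Int) (l2 : List Int) (w : Int) (flag : Bool) :
    pvInnerA pos l2 w flag = (flag || l2.any fun b => |pos - b| ≤ w) := by
  induction l2 with
  | nil => simp [pvInnerA]
  | cons p ps ih =>
    simp only [pvInnerA, List.any_cons]
    split_ifs with h <;> simp [ih, h]

theorem findAdjecency_eq_pvPair (l1 l2 : List Int) (w : Int) :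
    findAdjecency l1 l2 w = pvPair l1 l2 w := by
  unfold findAdjecency pvPair
  suffices h : ∀ flag : Bool,
      l1.foldl (fun flag pos => pvInnerA pos l2 w flag) flag
        = (flag || l1.any fun a => l2.any fun b => |a - b| ≤ w) by
    simpa using h false
  induction l1 with
  | nil => simp
  | cons a as ih =>
    intro flag
    rw [List.foldl_cons, pvInnerA_eq, ih, List.any_cons]
    simp [Bool.or_assoc]

theorem pvSweep_eq_pvPair (w : Int) (xs ys : List Int)
    (hx : xs.Pairwise (· ≤ ·)) (hy : ys.Pairwise (· ≤ ·)) :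
    pvSweep w xs ys = pvPair xs ys w := by
  fun_induction pvSweep w xs ys with
  | case1 ys => simp [pvPair]
  | case2 a as => simp [pvPair]
  | case3 a as b bs hab => simp [pvPair, hab]
  | case4 a as b bs hab hlt ih =>
    -- a pairs with nothing in b::bs : every y there is ≥ b > a + w
    have hb1 : w < b - a := by
      by_contra h
      exact hab (abs_le.mpr (by omega))
    have hnone : ((b :: bs).any fun y => decide (|a - y| ≤ w)) = false := by
      simp only [List.any_eq_false]
      intro y hyy hle
      have hy' : b ≤ y := by
        rcases List.mem_cons.mp hyy with rfl | h
        · exact le_refl _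
        · exact (List.pairwise_cons.mp hy).1 y h
      have habs := abs_le.mp (of_decide_eq_true hle)
      omega
    have hsplit : pvPair (a :: as) (b :: bs) w
        = (((b :: bs).any fun y => decide (|a - y| ≤ w)) || pvPair as (b :: bs) w) := by
      simp [pvPair]
    rw [ih (List.pairwise_cons.mp hx).2 hy, hsplit, hnone, Bool.false_or]
  | case5 a as b bs hab hlt ih =>
    -- b pairs with nothing in a::as : every x there is ≥ a, with a - b > w
    have hb1 : w < a - b := by
      by_contra h
      have hba : b ≤ a := by omega
      exact hab (abs_le.mpr (by omega))
    rw [ih hx (List.pairwise_cons.mp hy).2]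
    refine Bool.eq_iff_iff.mpr ?_
    simp only [pvPair, List.any_eq_true]
    constructor
    · rintro ⟨x, hxx, y, hyy, hd⟩
      exact ⟨x, hxx, y, List.mem_cons_of_mem _ hyy, hd⟩
    · rintro ⟨x, hxx, y, hyy, hd⟩
      rcases List.mem_cons.mp hyy with rfl | h
      · exfalso
        have hx' : a ≤ x := by
          rcases List.mem_cons.mp hxx with rfl | h
          · exact le_refl _
          · exact (List.pairwise_cons.mp hx).1 x h
        have habs := abs_le.mp (of_decide_eq_true hd)
        omega
      · exact ⟨x, hxx, y, h, hd⟩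

theorem pvPair_perm {l1 l1' l2 l2' : List Int} (h1 : l1.Perm l1') (h2 : l2.Perm l2') (w : Int) :
    pvPair l1 l2 w = pvPair l1' l2' w := by
  unfold pvPair
  refine Bool.eq_iff_iff.mpr ?_
  simp [List.any_eq_true, h1.mem_iff, h2.mem_iff]

-- ===== VERDICT (by name: the statement is the Claim_ definition above) =====
theorem findAdjecency_spec : Claim_equal_findAdjecency := by
  intro l1 l2 w _
  unfold Spec_findAdjecency findAdjecency_alt
  rw [findAdjecency_eq_pvPair,
      pvSweep_eq_pvPair w _ _ (PySem.List.sorted_pairwise l1 (fun x => x) ) (PySem.List.sorted_pairwise l2 (fun x => x))]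
  exact pvPair_perm (PySem.List.sorted_perm l1 (fun x => x) false).symm
    (PySem.List.sorted_perm l2 (fun x => x) false).symm w
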